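-- pv_equiv track=rewrite | github.com/clover3/Chair | src/tlm/qtype/content_split.py | categorize_token
-- ===== SOURCE A (Python) =====
-- def categorize_token(tokens, st, ed):
--     content_tokens = []
--     functional_tokens = []
--     out_s_list = []
--     for idx, raw_t in enumerate(tokens):
--         t = str(raw_t)
--         if idx == st:
--             out_s_list.append("[")
--         out_s_list.append(t)
--         if idx + 1 == ed:
--             out_s_list.append("]")
--         if st <= idx < ed:
--             content_tokens.append(t)
--         else:
--             functional_tokens.append(t)
--
--     content_span = str(tokens[st:ed])
--     return content_span, functional_tokens, out_s_list
-- ===== SOURCE B (Python) =====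
-- def categorize_token(tokens, st, ed):
--     ts = [str(t) for t in tokens]
--     cells = [[t] for t in ts]
--     if 0 <= st < len(cells):
--         cells[st].insert(0, "[")
--     if 0 <= ed - 1 < len(cells):
--         cells[ed - 1].append("]")
--     out_s_list = [x for cell in cells for x in cell]
--     functional_tokens = [t for i, t in enumerate(ts) if not (st <= i < ed)]
--     return str(tokens[st:ed]), functional_tokens, out_s_list
-- ===== Notes on version B (the rewrite author's own statement) =====
-- stated objective: alternative
-- what changed: A classifies every index in one interleaved loop with three accumulators, testing idx against st/ed at each step; B instead wraps each token in a one-element cell, performs two point updates (prepend '[' to cell st, append ']' to cell ed-1, if those tokens exist) and flattens, building the functional list as a separate index filter.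
import Mathlib
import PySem

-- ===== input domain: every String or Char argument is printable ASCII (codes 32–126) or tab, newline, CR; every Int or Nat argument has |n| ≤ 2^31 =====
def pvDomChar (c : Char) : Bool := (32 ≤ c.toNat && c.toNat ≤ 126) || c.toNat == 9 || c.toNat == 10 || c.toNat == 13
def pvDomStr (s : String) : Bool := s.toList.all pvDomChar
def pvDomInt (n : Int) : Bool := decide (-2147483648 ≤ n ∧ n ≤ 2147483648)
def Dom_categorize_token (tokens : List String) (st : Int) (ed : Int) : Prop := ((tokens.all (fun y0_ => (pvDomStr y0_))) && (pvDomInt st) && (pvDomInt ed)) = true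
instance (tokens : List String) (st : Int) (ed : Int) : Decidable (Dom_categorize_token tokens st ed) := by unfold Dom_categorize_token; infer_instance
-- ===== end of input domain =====

-- B replaces A's single interleaved indexed loop (three accumulators, per-index tests)
-- by two point updates on a list of one-token cells followed by a flatten, with the
-- functional tokens as a separate index filter (objective: alternative decomposition).

-- shared helper: Python's str() of a list of str (repr of each element joined by ", ").
-- Exact on the Dom character set (printable ASCII, tab, newline, CR): repr escapes
-- backslash, the chosen quote, \t, \n, \r; other Dom characters stay literal.
def pyReprChar (q : Char) (c : Char) : List Char :=
  if c = '\\' then ['\\', '\\']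
  else if c = q then ['\\', q]
  else if c = '\t' then ['\\', 't']
  else if c = '\n' then ['\\', 'n']
  else if c = '\r' then ['\\', 'r']
  else [c]

def pyReprStr (s : String) : String :=
  let cs := s.toList
  let q : Char := if cs.contains '\'' && !(cs.contains '"') then '"' else '\''
  String.ofList (q :: (cs.flatMap (pyReprChar q) ++ [q]))

def pyReprStrList (l : List String) : String :=
  String.ofList ('[' :: ((String.intercalate ", " (l.map pyReprStr)).toList ++ [']']))

-- ===== PORT A =====
-- the body of A's 'for idx, raw_t in enumerate(tokens)' loop, acting on the state
-- (content_tokens, functional_tokens, out_s_list); str(raw_t) is the identity on String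
def stepA (st ed : Int) (acc : List String × List String × List String)
    (p : Int × String) : List String × List String × List String :=
  let t := p.2
  let out1 := if p.1 = st then acc.2.2 ++ ["["] else acc.2.2
  let out2 := out1 ++ [t]
  let out3 := if p.1 + 1 = ed then out2 ++ ["]"] else out2
  if st ≤ p.1 ∧ p.1 < ed then (acc.1 ++ [t], acc.2.1, out3)
  else (acc.1, acc.2.1 ++ [t], out3)

def categorize_token (tokens : List String) (st : Int) (ed : Int) :
    String × List String × List String :=
  let r := (PySem.List.enumerate tokens).foldl (stepA st ed) ([], [], [])
  let content_span := pyReprStrList (PySem.List.slice tokens (some st) (some ed))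
  (content_span, r.2.1, r.2.2)

-- ===== PORT B =====
-- cells[st].insert(0, "[") / cells[ed-1].append("]") are in-range point updates → List.modify
def categorize_token_alt (tokens : List String) (st : Int) (ed : Int) :
    String × List String × List String :=
  let ts := tokens.map (fun t => t)
  let cells := ts.map (fun t => [t])
  let cells1 :=
    if 0 ≤ st ∧ st < (cells.length : Int) then cells.modify st.toNat (fun c => "[" :: c)
    else cells
  let cells2 :=
    if 0 ≤ ed - 1 ∧ ed - 1 < (cells1.length : Int) then
      cells1.modify (ed - 1).toNat (fun c => c ++ ["]"])
    else cells1
  let out_s_list := cells2.flatten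
  let functional_tokens :=
    ((PySem.List.enumerate ts).filter (fun p => !decide (st ≤ p.1 ∧ p.1 < ed))).map
      (fun p => p.2)
  (pyReprStrList (PySem.List.slice tokens (some st) (some ed)), functional_tokens, out_s_list)

-- ===== PRECONDITION & SPEC =====
def Spec_categorize_token (tokens : List String) (st : Int) (ed : Int) (out : String × List String × List String) : Prop := out = categorize_token_alt tokens st ed
instance (tokens : List String) (st : Int) (ed : Int) (out : String × List String × List String) : Decidable (Spec_categorize_token tokens st ed out) := by unfold Spec_categorize_token; infer_instance

-- ===== CLAIM (what is proved, stated in full; the proofs are below) =====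
def Claim_equal_categorize_token : Prop := ∀ (tokens : List String) (st : Int) (ed : Int), Dom_categorize_token tokens st ed → Spec_categorize_token tokens st ed (categorize_token tokens st ed)

-- ===== LEMMAS AND PROOFS =====

-- the out_s_list contribution of one iteration of A's loop at index p.1
def brk (st ed : Int) (p : Int × String) : List String :=
  (if p.1 = st then ["["] else []) ++ p.2 :: (if p.1 + 1 = ed then ["]"] else [])

theorem stepA_out (st ed : Int) (acc : List String × List String × List String)
    (p : Int × String) : (stepA st ed acc p).2.2 = acc.2.2 ++ brk st ed p := by
  simp only [stepA, brk]
  split_ifs <;> simp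

theorem stepA_func (st ed : Int) (acc : List String × List String × List String)
    (p : Int × String) :
    (stepA st ed acc p).2.1 = acc.2.1 ++ if st ≤ p.1 ∧ p.1 < ed then [] else [p.2] := by
  simp only [stepA]
  split_ifs <;> simp

theorem foldA_proj (st ed : Int) :
    ∀ (l : List (Int × String)) (acc : List String × List String × List String),
      (l.foldl (stepA st ed) acc).2.1
        = acc.2.1 ++ (l.filter (fun p => !decide (st ≤ p.1 ∧ p.1 < ed))).map (fun p => p.2)
      ∧ (l.foldl (stepA st ed) acc).2.2 = acc.2.2 ++ l.flatMap (brk st ed) := by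
  intro l
  induction l with
  | nil => intro acc; simp
  | cons p l ih =>
    intro acc
    obtain ⟨ih1, ih2⟩ := ih (stepA st ed acc p)
    constructor
    · rw [List.foldl_cons, ih1, stepA_func, List.filter_cons]
      by_cases h : st ≤ p.1 ∧ p.1 < ed <;> simp [h]
    · rw [List.foldl_cons, ih2, stepA_out, List.flatMap_cons]
      simp

-- B's two point updates on the cell list produce exactly A's per-index contributions
theorem alt_out (tokens : List String) (st ed : Int) :
    (categorize_token_alt tokens st ed).2.2
      = (PySem.List.enumerate tokens).flatMap (brk st ed) := by
  simp only [categorize_token_alt, List.map_id']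
  rw [List.flatMap_def]
  simp only [apply_ite List.length, List.length_modify, List.length_map, ite_self]
  congr 1
  apply List.ext_getElem
  · split_ifs <;> simp [List.length_modify, PySem.List.length_enumerate]
  · intro j h1 h2
    have hj : j < tokens.length := by
      simpa [PySem.List.length_enumerate] using h2
    rw [List.getElem_map, PySem.List.getElem_enumerate]
    simp only [brk, zero_add]
    split_ifs with hed hst hst
    · have e1 : st.toNat = j ↔ (j : Int) = st := by omega
      have e2 : (ed - 1).toNat = j ↔ (j : Int) + 1 = ed := by omega
      simp only [List.getElem_modify, List.getElem_map, e1, e2]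
      split_ifs <;> simp
    · have e1 : ¬((j : Int) = st) := by omega
      have e2 : (ed - 1).toNat = j ↔ (j : Int) + 1 = ed := by omega
      simp only [List.getElem_modify, List.getElem_map, e2, if_neg e1]
      split_ifs <;> simp
    · have e1 : st.toNat = j ↔ (j : Int) = st := by omega
      have e2 : ¬((j : Int) + 1 = ed) := by omega
      simp only [List.getElem_modify, List.getElem_map, e1, if_neg e2]
      split_ifs <;> simp
    · have e1 : ¬((j : Int) = st) := by omega
      have e2 : ¬((j : Int) + 1 = ed) := by omega
      simp [List.getElem_map, e1, e2]

theorem alt_func (tokens : List String) (st ed : Int) :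
    (categorize_token_alt tokens st ed).2.1
      = ((PySem.List.enumerate tokens).filter
          (fun p => !decide (st ≤ p.1 ∧ p.1 < ed))).map (fun p => p.2) := by
  simp only [categorize_token_alt, List.map_id']

-- ===== VERDICT (by name: the statement is the Claim_ definition above) =====
theorem categorize_token_spec : Claim_equal_categorize_token := by
  intro tokens st ed _
  unfold Spec_categorize_token
  obtain ⟨hf, ho⟩ := foldA_proj st ed (PySem.List.enumerate tokens) ([], [], [])
  refine Prod.ext rfl (Prod.ext ?_ ?_)
  · rw [alt_func]
    simp only [categorize_token]
    simpa using hf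
  · rw [alt_out]
    simp only [categorize_token]
    simpa using ho
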